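-- pv_equiv track=rewrite | github.com/bubpen/codekata | 프로그래머스/0/181874. A 강조하기/A 강조하기.py | solution
-- ===== SOURCE A (Python) =====
-- def solution(myString):
--     answer = ''
--     for i in myString:
--         if i in 'aA':
--             answer = answer + 'A'
--         else:
--             answer = answer + i.lower()
--     return answer
-- ===== SOURCE B (Python) =====
-- def solution(myString):
--     return myString.lower().replace('a', 'A')
-- ===== Notes on version B (the rewrite author's own statement) =====
-- stated objective: faster
-- what changed: Replaced the explicit per-character loop with quadratic string-concatenation accumulator by two whole-string library passes: lower() followed by a single replace.
import Mathlib
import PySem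

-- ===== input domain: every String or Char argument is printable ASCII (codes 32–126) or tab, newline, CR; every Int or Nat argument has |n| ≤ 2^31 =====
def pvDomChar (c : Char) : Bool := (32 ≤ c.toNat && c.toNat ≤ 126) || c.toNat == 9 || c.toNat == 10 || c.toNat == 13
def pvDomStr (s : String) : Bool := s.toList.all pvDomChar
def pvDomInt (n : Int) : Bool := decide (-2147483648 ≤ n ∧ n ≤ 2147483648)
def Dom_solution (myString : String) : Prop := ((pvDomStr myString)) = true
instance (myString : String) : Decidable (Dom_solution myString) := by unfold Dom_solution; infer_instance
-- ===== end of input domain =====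

-- B replaces A's per-character accumulation loop (quadratic string concatenation) by two whole-string passes, lower then replace (measured faster).

-- ===== PORT A =====
def solution (myString : String) : String :=
  String.ofList (myString.toList.foldl
    (fun answer i =>
      answer ++ (if PySem.Chars.isIn [i] "aA".toList then ['A'] else [PySem.Chars.lowerChar i]))
    [])

-- ===== PORT B =====
def solution_alt (myString : String) : String :=
  PySem.Str.replace (PySem.Str.lower myString) "a" "A"

-- ===== PRECONDITION & SPEC =====
def Spec_solution (myString : String) (out : String) : Prop := out = solution_alt myString
instance (myString : String) (out : String) : Decidable (Spec_solution myString out) := by unfold Spec_solution; infer_instance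

-- ===== CLAIM (what is proved, stated in full; the proofs are below) =====
def Claim_equal_solution : Prop := ∀ (myString : String), Dom_solution myString → Spec_solution myString (solution myString)

-- ===== LEMMAS AND PROOFS =====

lemma toNat_ofNat_small (n : Nat) (h : n < 55296) : (Char.ofNat n).toNat = n := by
  unfold Char.ofNat
  rw [dif_pos (Or.inl h : Nat.isValidChar n)]
  simp [Char.ofNatAux]

lemma char_toNat_inj {a b : Char} (h : a.toNat = b.toNat) : a = b := by
  cases a; cases b
  simp_all [Char.toNat]
  exact UInt32.toNat_inj.mp h

lemma replace_go_aA (fuel : Nat) :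
    ∀ (l acc : List Char), l.length ≤ fuel →
      PySem.Chars.replace.go ['a'] ['A'] fuel l acc
        = acc.reverse ++ l.map (fun c => if c = 'a' then 'A' else c) := by
  induction fuel with
  | zero =>
    intro l acc h
    have : l = [] := List.length_eq_zero_iff.mp (Nat.le_zero.mp h)
    subst this
    simp [PySem.Chars.replace.go]
  | succ n ih =>
    intro l acc h
    cases l with
    | nil => simp [PySem.Chars.replace.go]
    | cons c t =>
      by_cases hc : c = 'a'
      · subst hc
        have hpre : List.isPrefixOf ['a'] ('a' :: t) = true := by
          simp [List.isPrefixOf]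
        simp only [PySem.Chars.replace.go, hpre, if_true]
        rw [show List.drop (['a'] : List Char).length ('a' :: t) = t from rfl,
            ih t _ (by simp at h; omega)]
        simp
      · have hpre : List.isPrefixOf ['a'] (c :: t) = false := by
          simp [List.isPrefixOf]
          exact fun hh => hc hh.symm
        simp only [PySem.Chars.replace.go, hpre]
        rw [if_neg (by simp), ih t _ (by simp at h; omega)]
        simp [hc]

lemma foldl_solution_map (l : List Char) :
    ∀ acc : List Char,
      l.foldl (fun answer i =>
          answer ++ (if PySem.Chars.isIn [i] "aA".toList then ['A'] else [PySem.Chars.lowerChar i])) acc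
        = acc ++ l.map (fun i => if PySem.Chars.isIn [i] "aA".toList then 'A' else PySem.Chars.lowerChar i) := by
  induction l with
  | nil => intro acc; simp
  | cons c t ih =>
    intro acc
    rw [List.foldl_cons, ih, List.append_assoc]
    congr 1
    rw [List.map_cons]
    by_cases h : PySem.Chars.isIn [c] "aA".toList = true
    · rw [if_pos h, if_pos h]; rfl
    · rw [if_neg h, if_neg h]; rfl

lemma isIn_aA (c : Char) : PySem.Chars.isIn [c] "aA".toList = true ↔ (c = 'a' ∨ c = 'A') := by
  rw [show ("aA".toList : List Char) = ['a', 'A'] from rfl, PySem.Chars.isIn_iff_infix]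
  constructor
  · intro h
    have hm : c ∈ ['a', 'A'] := by
      obtain ⟨u, v, h⟩ := h
      have : c ∈ u ++ [c] ++ v := by simp
      rw [h] at this; simpa using this
    simpa using hm
  · rintro (rfl | rfl)
    · exact ⟨[], ['A'], rfl⟩
    · exact ⟨['a'], [], rfl⟩

lemma char_pointwise (c : Char) :
    (if PySem.Chars.isIn [c] "aA".toList then 'A' else PySem.Chars.lowerChar c)
      = (if PySem.Chars.lowerChar c = 'a' then 'A' else PySem.Chars.lowerChar c) := by
  by_cases h : PySem.Chars.isIn [c] "aA".toList = true
  · rcases (isIn_aA c).mp h with rfl | rfl <;> decide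
  · have hca : c ≠ 'a' := fun hh => h ((isIn_aA c).mpr (Or.inl hh))
    have hcA : c ≠ 'A' := fun hh => h ((isIn_aA c).mpr (Or.inr hh))
    have hne : PySem.Chars.lowerChar c ≠ 'a' := by
      unfold PySem.Chars.lowerChar PySem.Chars.isupper
      split_ifs with hu
      -- c is an uppercase letter; lowerChar c = 'a' would force c = 'A'
      · intro habs
        simp only [Bool.and_eq_true, decide_eq_true_eq] at hu
        obtain ⟨h1, h2⟩ := hu
        have h1' : 65 ≤ c.toNat := Char.le_def.mp h1
        have h2' : c.toNat ≤ 90 := Char.le_def.mp h2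
        have ht : (Char.ofNat (c.toNat + 32)).toNat = 97 := by rw [habs]; rfl
        rw [toNat_ofNat_small _ (by omega)] at ht
        exact hcA (char_toNat_inj (by rw [show ('A' : Char).toNat = 65 from rfl]; omega))
      · exact hca
    rw [if_neg h, if_neg hne]

-- ===== VERDICT (by name: the statement is the Claim_ definition above) =====
theorem solution_spec : Claim_equal_solution := by
  intro s _
  show solution s = solution_alt s
  unfold solution solution_alt
  apply String.ext
  rw [PySem.Str.toList_replace]
  show _ = PySem.Chars.replace (PySem.Str.lower s).toList "a".toList "A".toList
  rw [PySem.Str.toList_lower]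
  unfold PySem.Chars.replace
  rw [if_neg (by simp)]
  rw [show "a".toList = ['a'] from rfl, show "A".toList = ['A'] from rfl]
  rw [replace_go_aA _ _ _ (by simp [PySem.Chars.lower])]
  simp only [List.reverse_nil, List.nil_append, PySem.Chars.lower, List.map_map]
  rw [foldl_solution_map]
  simp only [List.nil_append, Function.comp_def, String.toList_ofList]
  exact List.map_congr_left (fun c _ => char_pointwise c)
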